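-- pv_equiv track=rewrite | github.com/4334zheng/ZHENGYANWEI | python/2020151022_郑彦薇_实验报告_5/Code/Test/matrix.py | largest_col_sum
-- ===== SOURCE A (Python) =====
-- def largest_col_sum(M):
--     max_sum = 0
--     for i in range(0,len(M[0])):
--         sum = 0
--         for j in range(0,len(M)):
--             sum += int(M[j][i])
--             if sum > max_sum:
--                 max_sum = sum
--     return max_sum
-- ===== SOURCE B (Python) =====
-- def largest_col_sum(M):
--     col_sums = [0] * len(M[0])
--     max_sum = 0
--     for j in range(len(M)):
--         row = M[j]
--         for i in range(len(col_sums)):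
--             col_sums[i] += int(row[i])
--             if col_sums[i] > max_sum:
--                 max_sum = col_sums[i]
--     return max_sum
-- ===== Notes on version B (the rewrite author's own statement) =====
-- stated objective: alternative
-- what changed: B replaces A's column-major scan (a scalar running sum reset for every column) by a single row-major pass that maintains a persistent vector of per-column running sums, updating the maximum as each entry is folded in.
import Mathlib
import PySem

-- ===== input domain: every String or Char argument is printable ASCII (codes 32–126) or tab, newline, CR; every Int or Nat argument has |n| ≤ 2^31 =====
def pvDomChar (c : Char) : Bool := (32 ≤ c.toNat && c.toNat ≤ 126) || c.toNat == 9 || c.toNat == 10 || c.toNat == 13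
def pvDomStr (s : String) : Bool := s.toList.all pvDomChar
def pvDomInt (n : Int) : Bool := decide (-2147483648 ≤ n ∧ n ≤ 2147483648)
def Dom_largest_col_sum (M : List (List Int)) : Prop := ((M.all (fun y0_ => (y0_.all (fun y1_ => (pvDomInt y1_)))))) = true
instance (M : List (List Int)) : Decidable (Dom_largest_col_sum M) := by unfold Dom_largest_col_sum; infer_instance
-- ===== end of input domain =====

-- B keeps a vector of per-column running sums updated row-major (one pass over the rows),
-- instead of A's column-major rescan with a scalar accumulator reset per column; objective: alternative.

-- ===== PORT A =====
def largest_col_sum (M : List (List Int)) : Int :=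
  (PySem.List.pyRange 0 ((PySem.List.pyGetD M 0 []).length : Int) 1).foldl
    (fun max_sum i =>
      ((PySem.List.pyRange 0 (M.length : Int) 1).foldl
        (fun (p : Int × Int) j =>
          let s := p.1 + PySem.List.pyGetD (PySem.List.pyGetD M j []) i 0
          (s, if s > p.2 then s else p.2)) (0, max_sum)).2) 0

-- ===== PORT B =====
def largest_col_sum_alt (M : List (List Int)) : Int :=
  let cs0 : List Int := List.replicate (PySem.List.pyGetD M 0 []).length 0
  ((PySem.List.pyRange 0 (M.length : Int) 1).foldl
    (fun (st : List Int × Int) j =>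
      let row := PySem.List.pyGetD M j []
      (PySem.List.pyRange 0 (st.1.length : Int) 1).foldl
        (fun (st2 : List Int × Int) i =>
          let v := PySem.List.pyGetD st2.1 i 0 + PySem.List.pyGetD row i 0
          (PySem.List.pySetD st2.1 i v, if v > st2.2 then v else st2.2)) st)
    (cs0, 0)).2

-- ===== PRECONDITION & SPEC =====
-- Pre_ excludes exactly the inputs where Python raises IndexError: the empty matrix
-- (M[0] fails) and ragged matrices with a row shorter than the first row (M[j][i] fails).
def Pre_largest_col_sum (M : List (List Int)) : Prop :=
  M ≠ [] ∧ ∀ row ∈ M, (M.headD []).length ≤ row.length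
instance (M : List (List Int)) : Decidable (Pre_largest_col_sum M) := by
  unfold Pre_largest_col_sum; infer_instance
def pvWitness_largest_col_sum : List (List Int) := [[1, -2], [3, 4]]
def Spec_largest_col_sum (M : List (List Int)) (out : Int) : Prop := out = largest_col_sum_alt M
instance (M : List (List Int)) (out : Int) : Decidable (Spec_largest_col_sum M out) := by unfold Spec_largest_col_sum; infer_instance

-- ===== CLAIM (what is proved, stated in full; the proofs are below) =====
def Claim_equal_largest_col_sum : Prop := ∀ (M : List (List Int)), Dom_largest_col_sum M → Pre_largest_col_sum M → Spec_largest_col_sum M (largest_col_sum M)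

-- ===== LEMMAS AND PROOFS =====

-- the max step both ports use
def pvMx (m v : Int) : Int := if v > m then v else m

theorem pvMx_eq_max (m v : Int) : pvMx m v = max m v := by
  simp [pvMx, max_def]; omega

-- running prefix sums of a column, starting from s
def pvPrefixes : Int → List Int → List Int
  | _, [] => []
  | s, x :: xs => (s + x) :: pvPrefixes (s + x) xs

-- pointwise sum of the column-sums vector with a row (row read with default 0)
def pvZipAdd : List Int → List Int → List Int
  | [], _ => []
  | c :: cs, r => (c + r.getD 0 0) :: pvZipAdd cs (r.drop 1)

-- successive column-sums vectors after each row
def pvRowsRun (cs : List Int) : List (List Int) → List (List Int)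
  | [] => []
  | r :: rs => pvZipAdd cs r :: pvRowsRun (pvZipAdd cs r) rs

-- column k of a matrix (entries read with default 0)
def pvCol (M : List (List Int)) (k : Nat) : List Int := M.map (fun r => r.getD k 0)

theorem pvZipAdd_length (cs : List Int) : ∀ r, (pvZipAdd cs r).length = cs.length := by
  induction cs with
  | nil => intro r; rfl
  | cons c cs ih => intro r; simp [pvZipAdd, ih]

theorem pvZipAdd_eq_map (cs : List Int) :
    ∀ r, pvZipAdd cs r = (List.range cs.length).map (fun k => cs.getD k 0 + r.getD k 0) := by
  induction cs with
  | nil => intro r; rfl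
  | cons c cs ih =>
      intro r
      show (c + r.getD 0 0) :: pvZipAdd cs (r.drop 1) = _
      rw [List.length_cons, List.range_succ_eq_map, List.map_cons, List.map_map]
      congr 1
      rw [ih (r.drop 1)]
      apply List.map_congr_left
      intro k _
      simp [Function.comp, List.getD]

-- fold over `range l.length` reading `l.getD` is a fold over `l`
theorem foldl_range_getD {α β : Type} (f : β → α → β) (d : α) :
    ∀ (l : List α) (b : β),
      (List.range l.length).foldl (fun acc j => f acc (l.getD j d)) b = l.foldl f b := by
  intro l
  induction l with
  | nil => intro b; rfl
  | cons x l ih =>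
      intro b
      rw [List.length_cons, List.range_succ_eq_map, List.foldl_cons, List.foldl_map]
      have : ∀ (b : β), (List.range l.length).foldl
          (fun acc j => f acc ((x :: l).getD (j + 1) d)) b
          = (List.range l.length).foldl (fun acc j => f acc (l.getD j d)) b := by
        intro b
        have hfg : (fun (acc : β) (j : Nat) => f acc ((x :: l).getD (j + 1) d))
            = fun acc j => f acc (l.getD j d) := by
          funext acc j; rfl
        rw [hfg]
      show (List.range l.length).foldl (fun acc j => f acc ((x :: l).getD (j + 1) d)) (f b x)
          = (x :: l).foldl f b
      rw [this, ih]
      rfl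

-- A's inner loop: thread (sum, max) down a list of values
theorem innerA (g : List Int → Int) :
    ∀ (rs : List (List Int)) (s m : Int),
      rs.foldl (fun (p : Int × Int) r =>
        let t := p.1 + g r
        (t, if t > p.2 then t else p.2)) (s, m)
      = (s + (rs.map g).sum, (pvPrefixes s (rs.map g)).foldl pvMx m) := by
  intro rs
  induction rs with
  | nil => intro s m; simp [pvPrefixes]
  | cons r rs ih =>
      intro s m
      simp only [List.foldl_cons, List.map_cons, pvPrefixes, List.sum_cons]
      rw [ih]
      rw [Prod.mk.injEq]
      exact ⟨by ring, by rfl⟩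

-- fold of pvMx over a flatMap
theorem foldl_mx_flatMap {α : Type} (P : α → List Int) :
    ∀ (l : List α) (m : Int),
      l.foldl (fun m a => (P a).foldl pvMx m) m = ((l.flatMap P).foldl pvMx m) := by
  intro l
  induction l with
  | nil => intro m; rfl
  | cons a l ih => intro m; simp [List.flatMap_cons, List.foldl_append, ih]

-- B's inner loop, generalized over the start index
theorem innerB_gen (row : List Int) :
    ∀ (fuel : Nat) (u : List Int) (k : Nat) (m : Int), k + fuel = u.length →
      (PySem.List.pyRange (k : Int) (u.length : Int) 1).foldl
        (fun (st2 : List Int × Int) i =>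
          let v := PySem.List.pyGetD st2.1 i 0 + PySem.List.pyGetD row i 0
          (PySem.List.pySetD st2.1 i v, if v > st2.2 then v else st2.2)) (u, m)
      = (u.take k ++ pvZipAdd (u.drop k) (row.drop k),
         (pvZipAdd (u.drop k) (row.drop k)).foldl pvMx m) := by
  intro fuel
  induction fuel with
  | zero =>
      intro u k m hk
      rw [PySem.List.pyRange_one_eq_nil (by omega)]
      simp only [List.foldl_nil]
      have hdrop : u.drop k = [] := by
        apply List.drop_eq_nil_of_le; omega
      simp [hdrop, pvZipAdd, List.take_of_length_le (by omega : u.length ≤ k)]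
  | succ fuel ih =>
      intro u k m hk
      have hklt : k < u.length := by omega
      rw [PySem.List.pyRange_one_cons (by exact_mod_cast hklt)]
      have hcast : ((k : Int) + 1) = ((k + 1 : Nat) : Int) := by push_cast; ring
      rw [hcast]
      simp only [List.foldl_cons, PySem.List.pyGetD_natCast, PySem.List.pySetD_natCast]
      set v : Int := u.getD k 0 + row.getD k 0 with hv
      have hlen : (u.set k v).length = u.length := by simp
      rw [← hlen]
      rw [ih (u.set k v) (k + 1) (if v > m then v else m) (by simp; omega)]
      -- relate take/drop of (u.set k v) at k+1 with those of u at k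
      have hset : u.set k v = u.take k ++ v :: u.drop (k + 1) :=
        List.set_eq_take_cons_drop v hklt
      have htake : (u.set k v).take (k + 1) = u.take k ++ [v] := by
        rw [hset]
        simp [List.take_append, List.take_of_length_le, Nat.le_of_lt hklt]
      have hdropset : (u.set k v).drop (k + 1) = u.drop (k + 1) := by
        rw [hset]
        simp [List.drop_append, Nat.le_of_lt hklt]
      have hdropu : u.drop k = u.getD k 0 :: u.drop (k + 1) := by
        rw [List.drop_eq_getElem_cons hklt, List.getD_eq_getElem u 0 hklt]
      have hdropr : (row.drop k).drop 1 = row.drop (k + 1) := by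
        rw [List.drop_drop]
      have hzip : pvZipAdd (u.drop k) (row.drop k)
          = v :: pvZipAdd (u.drop (k + 1)) (row.drop (k + 1)) := by
        rw [hdropu]; simp [pvZipAdd, hdropr, hv]
      rw [htake, hdropset, hzip]
      simp [List.foldl_cons, List.append_assoc, pvMx]

-- B's inner loop at k = 0
theorem innerB (row u : List Int) (m : Int) :
    (PySem.List.pyRange 0 (u.length : Int) 1).foldl
      (fun (st2 : List Int × Int) i =>
        let v := PySem.List.pyGetD st2.1 i 0 + PySem.List.pyGetD row i 0
        (PySem.List.pySetD st2.1 i v, if v > st2.2 then v else st2.2)) (u, m)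
    = (pvZipAdd u row, (pvZipAdd u row).foldl pvMx m) := by
  have := innerB_gen row u.length u 0 m (by omega)
  simpa using this

-- B's outer loop over the rows
theorem outerB : ∀ (rows : List (List Int)) (cs : List Int) (m : Int),
    (rows.foldl (fun (st : List Int × Int) row =>
      (PySem.List.pyRange 0 (st.1.length : Int) 1).foldl
        (fun (st2 : List Int × Int) i =>
          let v := PySem.List.pyGetD st2.1 i 0 + PySem.List.pyGetD row i 0
          (PySem.List.pySetD st2.1 i v, if v > st2.2 then v else st2.2)) st) (cs, m)).2
    = ((pvRowsRun cs rows).flatMap id).foldl pvMx m := by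
  intro rows
  induction rows with
  | nil => intro cs m; rfl
  | cons r rs ih =>
      intro cs m
      simp only [List.foldl_cons]
      rw [innerB r cs m, ih (pvZipAdd cs r) ((pvZipAdd cs r).foldl pvMx m)]
      simp [pvRowsRun, List.flatMap_cons, List.foldl_append]

-- interleaving permutation: heads-then-tails vs head-cons-tail, per element
theorem perm_map_append_flatMap {α β : Type} (h : α → β) (t : α → List β) :
    ∀ l : List α, (l.map h ++ l.flatMap t).Perm (l.flatMap (fun a => h a :: t a)) := by
  intro l
  induction l with
  | nil => simp
  | cons a l ih =>
      simp only [List.map_cons, List.flatMap_cons, List.cons_append]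
      refine List.Perm.cons _ ?_
      have h1 : (l.map h ++ (t a ++ l.flatMap t)).Perm (t a ++ (l.map h ++ l.flatMap t)) := by
        rw [← List.append_assoc, ← List.append_assoc]
        exact List.Perm.append_right _ List.perm_append_comm
      exact h1.trans (List.Perm.append_left (t a) ih)

-- transpose permutation: row-major list of running sums ~ column-major prefix sums
theorem transpose_perm : ∀ (rows : List (List Int)) (cs : List Int),
    ((pvRowsRun cs rows).flatMap id).Perm
      ((List.range cs.length).flatMap (fun k => pvPrefixes (cs.getD k 0) (pvCol rows k))) := by
  intro rows
  induction rows with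
  | nil => intro cs; simp [pvRowsRun, pvCol, pvPrefixes]
  | cons r rs ih =>
      intro cs
      simp only [pvRowsRun, List.flatMap_cons, id]
      have hlen : (pvZipAdd cs r).length = cs.length := pvZipAdd_length cs r
      have hget : ∀ k < cs.length, (pvZipAdd cs r).getD k 0 = cs.getD k 0 + r.getD k 0 := by
        intro k hk
        rw [pvZipAdd_eq_map]
        rw [List.getD_eq_getElem _ 0 (by simpa [hlen, pvZipAdd_eq_map] using (by simpa [hlen] using hk : k < (pvZipAdd cs r).length))]
        simp [hk]
      refine List.Perm.trans (List.Perm.append_left _ (ih (pvZipAdd cs r))) ?_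
      have heq : (List.range (pvZipAdd cs r).length).flatMap
            (fun k => pvPrefixes ((pvZipAdd cs r).getD k 0) (pvCol rs k))
          = (List.range cs.length).flatMap
            (fun k => pvPrefixes (cs.getD k 0 + r.getD k 0) (pvCol rs k)) := by
        rw [hlen]
        exact List.flatMap_congr (fun k hk => by rw [hget k (List.mem_range.mp hk)])
      rw [heq, pvZipAdd_eq_map cs r]
      have hpref : (List.range cs.length).flatMap
            (fun k => (cs.getD k 0 + r.getD k 0)
              :: pvPrefixes (cs.getD k 0 + r.getD k 0) (pvCol rs k))
          = (List.range cs.length).flatMap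
            (fun k => pvPrefixes (cs.getD k 0) (pvCol (r :: rs) k)) := by
        apply List.flatMap_congr
        intro k _
        show _ = pvPrefixes (cs.getD k 0) (r.getD k 0 :: pvCol rs k)
        rfl
      rw [← hpref]
      exact perm_map_append_flatMap _ _ _

-- A as a fold of pvMx over the column-major list
theorem portA_eq (M : List (List Int)) :
    largest_col_sum M
    = ((List.range (PySem.List.pyGetD M 0 []).length).flatMap
        (fun k => pvPrefixes 0 (pvCol M k))).foldl pvMx 0 := by
  unfold largest_col_sum
  rw [PySem.List.pyRange_zero_natCast, PySem.List.pyRange_zero_natCast]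
  simp only [List.foldl_map, PySem.List.pyGetD_natCast]
  rw [← foldl_mx_flatMap]
  have hbody : (fun (max_sum : Int) (i : Nat) =>
      ((List.range M.length).foldl (fun (p : Int × Int) j =>
        let s := p.1 + (M.getD j []).getD i 0
        (s, if s > p.2 then s else p.2)) (0, max_sum)).2)
      = fun (m : Int) (k : Nat) => (pvPrefixes 0 (pvCol M k)).foldl pvMx m := by
    funext m k
    rw [foldl_range_getD (fun (p : Int × Int) (row : List Int) =>
      let s := p.1 + row.getD k 0
      (s, if s > p.2 then s else p.2)) [] M (0, m)]
    rw [innerA (fun row => row.getD k 0) M 0 m]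
    rfl
  rw [hbody]

-- B as a fold of pvMx over the row-major list
theorem portB_eq (M : List (List Int)) :
    largest_col_sum_alt M
    = ((pvRowsRun (List.replicate (PySem.List.pyGetD M 0 []).length 0) M).flatMap id).foldl pvMx 0 := by
  show ((PySem.List.pyRange 0 (M.length : Int) 1).foldl
    (fun (st : List Int × Int) j =>
      let row := PySem.List.pyGetD M j []
      (PySem.List.pyRange 0 (st.1.length : Int) 1).foldl
        (fun (st2 : List Int × Int) i =>
          let v := PySem.List.pyGetD st2.1 i 0 + PySem.List.pyGetD row i 0
          (PySem.List.pySetD st2.1 i v, if v > st2.2 then v else st2.2)) st)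
    (List.replicate (PySem.List.pyGetD M 0 []).length 0, 0)).2 = _
  rw [PySem.List.pyRange_zero_natCast]
  simp only [List.foldl_map, PySem.List.pyGetD_natCast]
  rw [foldl_range_getD (fun (st : List Int × Int) (row : List Int) =>
      (PySem.List.pyRange 0 (st.1.length : Int) 1).foldl
        (fun (st2 : List Int × Int) i =>
          let v := PySem.List.pyGetD st2.1 i 0 + PySem.List.pyGetD row i 0
          (PySem.List.pySetD st2.1 i v, if v > st2.2 then v else st2.2)) st) [] M
      (List.replicate (PySem.List.pyGetD M 0 []).length 0, 0)]
  exact outerB M _ 0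

-- ===== VERDICT (by name: the statement is the Claim_ definition above) =====
theorem largest_col_sum_spec : Claim_equal_largest_col_sum := by
  intro M _ _
  unfold Spec_largest_col_sum
  rw [portA_eq, portB_eq]
  set C := (PySem.List.pyGetD M 0 []).length with hC
  have hperm := transpose_perm M (List.replicate C 0)
  have hlen : (List.replicate C (0 : Int)).length = C := by simp
  rw [hlen] at hperm
  have hrw : (List.range C).flatMap
        (fun k => pvPrefixes ((List.replicate C (0 : Int)).getD k 0) (pvCol M k))
      = (List.range C).flatMap (fun k => pvPrefixes 0 (pvCol M k)) := by
    apply List.flatMap_congr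
    intro k hk
    simp [List.mem_range.mp hk]
  rw [hrw] at hperm
  exact (hperm.foldl_eq' (fun x _ y _ z => by
    simp [pvMx_eq_max, max_right_comm]) 0).symm
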